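-- pv_equiv track=rewrite | github.com/liuxunchenglxc/Reducio | Main/differentiable_search.py | get_bin_nums
-- ===== SOURCE A (Python) =====
-- def get_bin_nums(matrix):
--     def get_bin_num(row):
--         res = 0
--         for i in row:
--             res <<= 1
--             res += i
--         return res
--
--     res = []
--     for row in matrix:
--         res.append(get_bin_num(row))
--     return res
-- ===== SOURCE B (Python) =====
-- def get_bin_nums(matrix):
--     def get_bin_num(row):
--         n = len(row)
--         return sum(bit << (n - 1 - j) for j, bit in enumerate(row))
--     return [get_bin_num(row) for row in matrix]
-- ===== Notes on version B (the rewrite author's own statement) =====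
-- stated objective: alternative
-- what changed: Each row is converted by an independent positional-weight sum (bit << (n-1-j) over enumerate) instead of a Horner shift-accumulate loop, and the result list is a comprehension instead of append-in-a-loop.
import Mathlib
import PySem

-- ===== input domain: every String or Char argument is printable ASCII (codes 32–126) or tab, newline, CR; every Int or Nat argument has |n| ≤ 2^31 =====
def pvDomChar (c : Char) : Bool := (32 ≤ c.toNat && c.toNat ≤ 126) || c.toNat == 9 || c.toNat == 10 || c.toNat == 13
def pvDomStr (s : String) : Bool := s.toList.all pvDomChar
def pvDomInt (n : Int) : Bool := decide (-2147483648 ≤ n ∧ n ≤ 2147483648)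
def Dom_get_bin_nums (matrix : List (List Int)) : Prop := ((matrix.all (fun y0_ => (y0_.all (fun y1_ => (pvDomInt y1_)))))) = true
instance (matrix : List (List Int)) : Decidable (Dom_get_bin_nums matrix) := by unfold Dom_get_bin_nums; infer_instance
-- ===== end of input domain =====

-- B replaces the Horner shift-accumulate per row by an independent positional-weight sum
-- (bit << (n-1-j)) and builds the result with a comprehension (objective: alternative).


-- ===== PORT A =====
-- inner helper: res = 0; for i in row: res <<= 1; res += i
def get_bin_num_A (row : List Int) : Int :=
  row.foldl (fun res i => (res <<< (1:Nat)) + i) 0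

def get_bin_nums (matrix : List (List Int)) : List Int :=
  matrix.foldl (fun res row => res ++ [get_bin_num_A row]) []

-- ===== PORT B =====
-- n = len(row); sum(bit << (n - 1 - j) for j, bit in enumerate(row));
-- the shift count n-1-j is the (nonnegative) Python int, taken to Nat.
def get_bin_num_B (row : List Int) : Int :=
  let n : Int := row.length
  ((PySem.List.enumerate row).map (fun (jb : Int × Int) => jb.2 <<< (n - 1 - jb.1).toNat)).sum

def get_bin_nums_alt (matrix : List (List Int)) : List Int :=
  matrix.map get_bin_num_B

-- ===== PRECONDITION & SPEC =====
def Spec_get_bin_nums (matrix : List (List Int)) (out : List Int) : Prop := out = get_bin_nums_alt matrix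
instance (matrix : List (List Int)) (out : List Int) : Decidable (Spec_get_bin_nums matrix out) := by unfold Spec_get_bin_nums; infer_instance

-- ===== CLAIM (what is proved, stated in full; the proofs are below) =====
def Claim_equal_get_bin_nums : Prop := ∀ (matrix : List (List Int)), Dom_get_bin_nums matrix → Spec_get_bin_nums matrix (get_bin_nums matrix)

-- ===== LEMMAS AND PROOFS =====

theorem enumerate_succ_start (xs : List Int) : ∀ s : Int,
    PySem.List.enumerate xs (s + 1) =
      (PySem.List.enumerate xs s).map (fun p => (p.1 + 1, p.2)) := by
  induction xs with
  | nil => intro s; simp [PySem.List.enumerate_nil]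
  | cons x xs ih =>
    intro s
    simp only [PySem.List.enumerate_cons, List.map_cons, ih (s + 1)]

theorem get_bin_num_B_cons (x : Int) (xs : List Int) :
    get_bin_num_B (x :: xs) = x <<< xs.length + get_bin_num_B xs := by
  simp only [get_bin_num_B, PySem.List.enumerate_cons, List.map_cons, List.sum_cons,
    enumerate_succ_start xs 0, List.map_map]
  congr 1
  · congr 1
    simp
  · congr 1
    apply List.map_congr_left
    intro p _
    simp only [Function.comp_apply, List.length_cons]
    congr 2
    push_cast
    ring

theorem horner_eq (xs : List Int) : ∀ acc : Int,
    xs.foldl (fun (res : Int) i => (res <<< (1:Nat)) + i) acc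
      = acc <<< xs.length + get_bin_num_B xs := by
  induction xs with
  | nil =>
    intro acc
    simp [get_bin_num_B, PySem.List.enumerate_nil, Int.shiftLeft_eq]
  | cons x xs ih =>
    intro acc
    rw [List.foldl_cons, ih, get_bin_num_B_cons]
    rw [show acc <<< (1:Nat) = acc * 2 from by rw [Int.shiftLeft_eq]; ring]
    simp only [Int.shiftLeft_eq, List.length_cons, pow_succ]
    ring

-- ===== VERDICT (by name: the statement is the Claim_ definition above) =====
theorem get_bin_nums_spec : Claim_equal_get_bin_nums := by
  intro matrix _
  show get_bin_nums matrix = get_bin_nums_alt matrix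
  rw [get_bin_nums, get_bin_nums_alt, PySem.List.foldl_append_singleton_eq_map]
  apply List.map_congr_left
  intro row _
  rw [get_bin_num_A, horner_eq row 0]
  simp [Int.shiftLeft_eq]
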